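-- pv_equiv track=rewrite | github.com/L10n07k1n9/py-scic | prob/prob1.py | GeneratorSucesionChistosa_Mod7
-- ===== SOURCE A (Python) =====
-- BASE_CASES = {0: 0, 1: 4, 2: 3}
--
-- def f(n):
--     if n <= 0:
--         return BASE_CASES[0]
--     elif n <= 2:
--         return BASE_CASES[n]
--     else:
--         # f(n) = 2 * f(n - 2) - f(n - 1) + f(n - 3) para n >= 3
--         return 2 * f(n - 2) - f(n - 1) + f(n - 3)
--
-- def GeneratorSucesionChistosa_Mod7(x):
--     r, a, b, m = [], 0, 0, 7
--     for n in range(0, x + 1):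
--         b = f(n)
--         a = b % m
--         if a == 0:
--             r.append(b)
--     return r
-- ===== SOURCE B (Python) =====
-- def GeneratorSucesionChistosa_Mod7(x):
--     r = []
--     window = (0, 4, 3)  # (f(n), f(n+1), f(n+2)) sliding window over the recurrence
--     for n in range(0, x + 1):
--         v, w1, w2 = window
--         if v % 7 == 0:
--             r.append(v)
--         window = (w1, w2, 2 * w1 - w2 + v)
--     return r
-- ===== Notes on version B (the rewrite author's own statement) =====
-- stated objective: faster
-- what changed: Replaces the exponential triple recursion f (re-evaluated from scratch at every n) by a single O(x) pass keeping a sliding window of the last three values of the recurrence.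
import Mathlib
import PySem

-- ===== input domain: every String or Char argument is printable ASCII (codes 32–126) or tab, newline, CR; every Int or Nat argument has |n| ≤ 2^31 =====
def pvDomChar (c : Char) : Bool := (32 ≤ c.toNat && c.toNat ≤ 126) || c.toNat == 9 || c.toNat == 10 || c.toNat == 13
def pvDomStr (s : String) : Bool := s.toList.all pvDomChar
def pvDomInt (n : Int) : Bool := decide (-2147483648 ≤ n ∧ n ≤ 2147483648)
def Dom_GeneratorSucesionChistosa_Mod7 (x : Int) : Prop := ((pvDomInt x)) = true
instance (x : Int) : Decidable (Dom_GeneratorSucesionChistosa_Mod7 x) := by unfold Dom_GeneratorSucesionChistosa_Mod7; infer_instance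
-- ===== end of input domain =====

-- B replaces A's exponential triple recursion by a single O(x) pass over a sliding window of the last three values (faster: asymptotic).

-- ===== PORT A =====
-- BASE_CASES = {0: 0, 1: 4, 2: 3}
def pvBaseCases : PySem.Dict Int Int := PySem.Dict.ofList [(0, 0), (1, 4), (2, 3)]

-- f(n); keys 0,1,2 are always present in BASE_CASES so the [] lookup is ported as getD 0 (never used as default)
def pvF (n : Int) : Int :=
  if n ≤ 0 then PySem.Dict.getD pvBaseCases 0 0
  else if n ≤ 2 then PySem.Dict.getD pvBaseCases n 0
  else 2 * pvF (n - 2) - pvF (n - 1) + pvF (n - 3)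
termination_by n.toNat
decreasing_by all_goals omega

def GeneratorSucesionChistosa_Mod7 (x : Int) : List Int :=
  (PySem.List.pyRange 0 (x + 1) 1).foldl
    (fun r n =>
      let b := pvF n
      let a := PySem.Int.mod b 7
      if a == 0 then r ++ [b] else r) []

-- ===== PORT B =====
-- loop body of Source B: window = (f(n), f(n+1), f(n+2)); k = remaining iterations
def pvAltLoop : Nat → Int × Int × Int → List Int → List Int
  | 0, _, r => r
  | k + 1, (v, w1, w2), r =>
      pvAltLoop k (w1, w2, 2 * w1 - w2 + v) (if PySem.Int.mod v 7 == 0 then r ++ [v] else r)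

def GeneratorSucesionChistosa_Mod7_alt (x : Int) : List Int :=
  pvAltLoop (x + 1).toNat (0, 4, 3) []

-- ===== PRECONDITION & SPEC =====
def Spec_GeneratorSucesionChistosa_Mod7 (x : Int) (out : List Int) : Prop := out = GeneratorSucesionChistosa_Mod7_alt x
instance (x : Int) (out : List Int) : Decidable (Spec_GeneratorSucesionChistosa_Mod7 x out) := by unfold Spec_GeneratorSucesionChistosa_Mod7; infer_instance

-- ===== CLAIM (what is proved, stated in full; the proofs are below) =====
def Claim_equal_GeneratorSucesionChistosa_Mod7 : Prop := ∀ (x : Int), Dom_GeneratorSucesionChistosa_Mod7 x → Spec_GeneratorSucesionChistosa_Mod7 x (GeneratorSucesionChistosa_Mod7 x)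

-- ===== LEMMAS AND PROOFS =====

-- the recurrence, read forward: for s ≥ 0, f(s+3) = 2 f(s+1) - f(s+2) + f(s)
lemma pvF_add3 (s : Int) (hs : 0 ≤ s) :
    pvF (s + 3) = 2 * pvF (s + 1) - pvF (s + 2) + pvF s := by
  rw [pvF]
  have h1 : ¬ s + 3 ≤ 0 := by omega
  have h2 : ¬ s + 3 ≤ 2 := by omega
  simp only [h1, h2, if_false]
  have e1 : s + 3 - 2 = s + 1 := by ring
  have e2 : s + 3 - 1 = s + 2 := by ring
  have e3 : s + 3 - 3 = s := by ring
  rw [e1, e2, e3]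

-- A's fold over [s, …, s+k-1] equals B's window loop started at f(s)
lemma pvLoop_eq (k : Nat) : ∀ (s : Int), 0 ≤ s → ∀ (r : List Int),
    (PySem.List.pyRange s (s + k) 1).foldl
      (fun r n =>
        let b := pvF n
        let a := PySem.Int.mod b 7
        if a == 0 then r ++ [b] else r) r
    = pvAltLoop k (pvF s, pvF (s + 1), pvF (s + 2)) r := by
  induction k with
  | zero =>
      intro s hs r
      simp [PySem.List.pyRange, pvAltLoop]
  | succ k ih =>
      intro s hs r
      rw [PySem.List.pyRange_one_cons (by push_cast; omega)]
      have e : s + ((k + 1 : Nat) : Int) = (s + 1) + (k : Int) := by push_cast; ring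
      rw [e, List.foldl_cons, ih (s + 1) (by omega)]
      have a1 : s + 1 + 1 = s + 2 := by ring
      have a2 : s + 1 + 2 = s + 3 := by ring
      rw [a1, a2, pvF_add3 s hs]
      rfl

theorem pv_main (x : Int) :
    GeneratorSucesionChistosa_Mod7 x = GeneratorSucesionChistosa_Mod7_alt x := by
  unfold GeneratorSucesionChistosa_Mod7 GeneratorSucesionChistosa_Mod7_alt
  by_cases h : x + 1 ≤ 0
  · have h0 : (x + 1).toNat = 0 := by omega
    rw [h0]
    have : PySem.List.pyRange 0 (x + 1) 1 = [] := by
      simp [PySem.List.pyRange]; omega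
    rw [this]
    simp [pvAltLoop]
  · have h := pvLoop_eq (x + 1).toNat 0 le_rfl []
    have f0 : pvF 0 = 0 := by rw [pvF]; decide
    have f1 : pvF (0 + 1) = 4 := by rw [pvF]; decide
    have f2 : pvF (0 + 2) = 3 := by rw [pvF]; decide
    rw [f0, f1, f2] at h
    have hc : (0 : Int) + (((x + 1).toNat : Nat) : Int) = x + 1 := by omega
    rw [hc] at h
    exact h

-- ===== VERDICT (by name: the statement is the Claim_ definition above) =====
theorem GeneratorSucesionChistosa_Mod7_spec : Claim_equal_GeneratorSucesionChistosa_Mod7 := by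
  intro x _
  exact pv_main x
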